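-- pv_equiv track=rewrite | github.com/rounak-dutta/RPI-Pico-16-BTn-MIDI-Controller-using-CircuitPython | 16-BTn_MIDI_Controller_ver1.py | noteListUpdate
-- ===== SOURCE A (Python) =====
-- noteStart = 48  # (C4)
--
-- chrOffsets = [0, 1, 2, 3, 4, 5, 6, 7, 8, 9, 10, 11, 12, 13, 14, 15]  # chromatic
--
-- minOffsets = [0, 2, 3, 5, 7, 8, 10, 12, 14, 15, 17, 19, 20, 22, 24, 26]  # Minor
--
-- majOffsets = [0, 2, 4, 5, 7, 9, 11, 12, 14, 16, 17, 19, 21, 23, 24, 26]  # Major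
--
-- minPentOffsets = [0, 3, 5, 7, 10, 12, 15, 17, 19, 22, 24, 27, 29, 31, 34, 36]  # Min Pen
--
-- majPentOffsets = [0, 2, 4, 7, 9, 12, 14, 16, 19, 21, 24, 26, 28, 31, 33, 36]   # Maj Pen
--
-- dorOffsets = [0, 2, 3, 5, 7, 9, 10, 12, 14, 15, 17, 19, 21, 22, 24, 26]  # Dorian
--
-- phrOffsets = [0, 1, 3, 5, 7, 8, 10, 12, 13, 15, 17, 19, 20, 22, 24, 25]  # Phrygian
--
-- lydOffsets = [0, 2, 4, 6, 7, 9, 11, 12, 14, 16, 18, 19, 21, 23, 24, 26]  # Lydian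
--
-- mixOffsets = [0, 2, 4, 5, 7, 9, 10, 12, 14, 16, 17, 19, 21, 22, 24, 26]  # Mixolydian
--
-- mnhOffsets = [0, 2, 3, 5, 7, 8, 11, 12, 14, 15, 17, 19, 20, 23, 24, 26]  # Harmonic Min
--
-- def noteListUpdate(sclSel):
--     noteList = []
--     if (sclSel == 0):
--         for nt in range(0, 16, 1):
--             noteList.append(noteStart + chrOffsets[nt])
--     elif (sclSel == 1):
--         for nt in range(0, 16, 1):
--             noteList.append(noteStart + minOffsets[nt])
--     elif (sclSel == 2):
--         for nt in range(0, 16, 1):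
--             noteList.append(noteStart + majOffsets[nt])
--     elif (sclSel == 3):
--         for nt in range(0, 16, 1):
--             noteList.append(noteStart + minPentOffsets[nt])
--     elif (sclSel == 4):
--         for nt in range(0, 16, 1):
--             noteList.append(noteStart + majPentOffsets[nt])
--     elif (sclSel == 5):
--         for nt in range(0, 16, 1):
--             noteList.append(noteStart + dorOffsets[nt])
--     elif (sclSel == 6):
--         for nt in range(0, 16, 1):
--             noteList.append(noteStart + phrOffsets[nt])
--     elif (sclSel == 7):
--         for nt in range(0, 16, 1):
--             noteList.append(noteStart + lydOffsets[nt])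
--     elif (sclSel == 8):
--         for nt in range(0, 16, 1):
--             noteList.append(noteStart + mixOffsets[nt])
--     elif (sclSel == 9):
--         for nt in range(0, 16, 1):
--             noteList.append(noteStart + mnhOffsets[nt])
--     return noteList
-- ===== SOURCE B (Python) =====
-- noteStart = 48  # (C4)
--
-- # Each scale is represented by its cyclic interval-step pattern (semitones
-- # between successive scale degrees); the 16 notes are generated by a running
-- # cumulative sum starting at noteStart, cycling through the pattern.
-- SCALE_STEPS = {
--     0: [1],                      # chromatic
--     1: [2, 1, 2, 2, 1, 2, 2],    # Minor
--     2: [2, 2, 1, 2, 2, 2, 1],    # Major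
--     3: [3, 2, 2, 3, 2],          # Min Pent
--     4: [2, 2, 3, 2, 3],          # Maj Pent
--     5: [2, 1, 2, 2, 2, 1, 2],    # Dorian
--     6: [1, 2, 2, 2, 1, 2, 2],    # Phrygian
--     7: [2, 2, 2, 1, 2, 2, 1],    # Lydian
--     8: [2, 2, 1, 2, 2, 1, 2],    # Mixolydian
--     9: [2, 1, 2, 2, 1, 3, 1],    # Harmonic Min
-- }
--
-- def noteListUpdate(sclSel):
--     steps = SCALE_STEPS.get(sclSel)
--     if steps is None:
--         return []
--     notes = []
--     n = noteStart
--     for i in range(16):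
--         notes.append(n)
--         n += steps[i % len(steps)]
--     return notes
-- ===== Notes on version B (the rewrite author's own statement) =====
-- stated objective: alternative
-- what changed: Replaces A's ten hard-coded offset tables selected by an if/elif chain with per-scale cyclic interval-step patterns: B generates the note list by a running cumulative sum (n += steps[i % len(steps)]) starting at noteStart.
import Mathlib
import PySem

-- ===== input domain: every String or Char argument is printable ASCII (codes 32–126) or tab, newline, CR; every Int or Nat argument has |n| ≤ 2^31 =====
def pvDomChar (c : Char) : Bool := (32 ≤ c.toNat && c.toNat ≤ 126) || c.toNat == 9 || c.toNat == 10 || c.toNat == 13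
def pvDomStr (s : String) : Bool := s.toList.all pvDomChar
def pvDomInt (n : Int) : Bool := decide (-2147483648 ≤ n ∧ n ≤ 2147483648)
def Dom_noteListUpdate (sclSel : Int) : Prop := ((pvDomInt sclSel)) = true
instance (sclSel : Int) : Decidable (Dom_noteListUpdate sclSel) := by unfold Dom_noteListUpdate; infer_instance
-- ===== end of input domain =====

-- B generates the note list by cumulative summation over each scale's cyclic interval-step pattern instead of A's hard-coded offset tables (alternative algorithm; same cost).

-- ===== PORT A =====
def pvNoteStart : Int := 48
def pvChrOffsets : List Int := [0, 1, 2, 3, 4, 5, 6, 7, 8, 9, 10, 11, 12, 13, 14, 15]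
def pvMinOffsets : List Int := [0, 2, 3, 5, 7, 8, 10, 12, 14, 15, 17, 19, 20, 22, 24, 26]
def pvMajOffsets : List Int := [0, 2, 4, 5, 7, 9, 11, 12, 14, 16, 17, 19, 21, 23, 24, 26]
def pvMinPentOffsets : List Int := [0, 3, 5, 7, 10, 12, 15, 17, 19, 22, 24, 27, 29, 31, 34, 36]
def pvMajPentOffsets : List Int := [0, 2, 4, 7, 9, 12, 14, 16, 19, 21, 24, 26, 28, 31, 33, 36]
def pvDorOffsets : List Int := [0, 2, 3, 5, 7, 9, 10, 12, 14, 15, 17, 19, 21, 22, 24, 26]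
def pvPhrOffsets : List Int := [0, 1, 3, 5, 7, 8, 10, 12, 13, 15, 17, 19, 20, 22, 24, 25]
def pvLydOffsets : List Int := [0, 2, 4, 6, 7, 9, 11, 12, 14, 16, 18, 19, 21, 23, 24, 26]
def pvMixOffsets : List Int := [0, 2, 4, 5, 7, 9, 10, 12, 14, 16, 17, 19, 21, 22, 24, 26]
def pvMnhOffsets : List Int := [0, 2, 3, 5, 7, 8, 11, 12, 14, 15, 17, 19, 20, 23, 24, 26]

-- one 'for nt in range(0, 16, 1): noteList.append(noteStart + offs[nt])' loop (indexing is always in range)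
def pvApLoop (offs : List Int) (noteList : List Int) : List Int :=
  (PySem.List.pyRange 0 16 1).foldl
    (fun acc nt => acc ++ [pvNoteStart + PySem.List.pyGetD offs nt 0]) noteList

def noteListUpdate (sclSel : Int) : List Int :=
  let noteList : List Int := []
  if sclSel = 0 then pvApLoop pvChrOffsets noteList
  else if sclSel = 1 then pvApLoop pvMinOffsets noteList
  else if sclSel = 2 then pvApLoop pvMajOffsets noteList
  else if sclSel = 3 then pvApLoop pvMinPentOffsets noteList
  else if sclSel = 4 then pvApLoop pvMajPentOffsets noteList
  else if sclSel = 5 then pvApLoop pvDorOffsets noteList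
  else if sclSel = 6 then pvApLoop pvPhrOffsets noteList
  else if sclSel = 7 then pvApLoop pvLydOffsets noteList
  else if sclSel = 8 then pvApLoop pvMixOffsets noteList
  else if sclSel = 9 then pvApLoop pvMnhOffsets noteList
  else noteList

-- ===== PORT B =====
-- cyclic interval-step patterns (semitones between successive scale degrees)
def pvScaleSteps : PySem.Dict Int (List Int) :=
  PySem.Dict.ofList
    [(0, [1]),
     (1, [2, 1, 2, 2, 1, 2, 2]),
     (2, [2, 2, 1, 2, 2, 2, 1]),
     (3, [3, 2, 2, 3, 2]),
     (4, [2, 2, 3, 2, 3]),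
     (5, [2, 1, 2, 2, 2, 1, 2]),
     (6, [1, 2, 2, 2, 1, 2, 2]),
     (7, [2, 2, 2, 1, 2, 2, 1]),
     (8, [2, 2, 1, 2, 2, 1, 2]),
     (9, [2, 1, 2, 2, 1, 3, 1])]

-- for i in range(16): notes.append(n); n += steps[i % len(steps)]
def noteListUpdate_alt (sclSel : Int) : List Int :=
  match pvScaleSteps.get? sclSel with
  | none => []
  | some steps =>
    ((PySem.List.pyRange 0 16 1).foldl
      (fun (p : List Int × Int) i =>
        (p.1 ++ [p.2],
         p.2 + PySem.List.pyGetD steps (PySem.Int.mod i (Int.ofNat steps.length)) 0))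
      ([], pvNoteStart)).1

-- ===== PRECONDITION & SPEC =====
def Spec_noteListUpdate (sclSel : Int) (out : List Int) : Prop := out = noteListUpdate_alt sclSel
instance (sclSel : Int) (out : List Int) : Decidable (Spec_noteListUpdate sclSel out) := by unfold Spec_noteListUpdate; infer_instance

-- ===== CLAIM (what is proved, stated in full; the proofs are below) =====
def Claim_equal_noteListUpdate : Prop := ∀ (sclSel : Int), Dom_noteListUpdate sclSel → Spec_noteListUpdate sclSel (noteListUpdate sclSel)

-- ===== LEMMAS AND PROOFS =====

-- ===== VERDICT (by name: the statement is the Claim_ definition above) =====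
theorem noteListUpdate_spec : Claim_equal_noteListUpdate := by
  intro s _
  unfold Spec_noteListUpdate
  by_cases h0 : s = 0; · subst h0; decide
  by_cases h1 : s = 1; · subst h1; decide
  by_cases h2 : s = 2; · subst h2; decide
  by_cases h3 : s = 3; · subst h3; decide
  by_cases h4 : s = 4; · subst h4; decide
  by_cases h5 : s = 5; · subst h5; decide
  by_cases h6 : s = 6; · subst h6; decide
  by_cases h7 : s = 7; · subst h7; decide
  by_cases h8 : s = 8; · subst h8; decide
  by_cases h9 : s = 9; · subst h9; decide
  have g0 : ¬((0:Int) = s) := fun h => h0 h.symm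
  have g1 : ¬((1:Int) = s) := fun h => h1 h.symm
  have g2 : ¬((2:Int) = s) := fun h => h2 h.symm
  have g3 : ¬((3:Int) = s) := fun h => h3 h.symm
  have g4 : ¬((4:Int) = s) := fun h => h4 h.symm
  have g5 : ¬((5:Int) = s) := fun h => h5 h.symm
  have g6 : ¬((6:Int) = s) := fun h => h6 h.symm
  have g7 : ¬((7:Int) = s) := fun h => h7 h.symm
  have g8 : ¬((8:Int) = s) := fun h => h8 h.symm
  have g9 : ¬((9:Int) = s) := fun h => h9 h.symm
  have b0 : ((0:Int) == s) = false := beq_eq_false_iff_ne.mpr g0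
  have b1 : ((1:Int) == s) = false := beq_eq_false_iff_ne.mpr g1
  have b2 : ((2:Int) == s) = false := beq_eq_false_iff_ne.mpr g2
  have b3 : ((3:Int) == s) = false := beq_eq_false_iff_ne.mpr g3
  have b4 : ((4:Int) == s) = false := beq_eq_false_iff_ne.mpr g4
  have b5 : ((5:Int) == s) = false := beq_eq_false_iff_ne.mpr g5
  have b6 : ((6:Int) == s) = false := beq_eq_false_iff_ne.mpr g6
  have b7 : ((7:Int) == s) = false := beq_eq_false_iff_ne.mpr g7
  have b8 : ((8:Int) == s) = false := beq_eq_false_iff_ne.mpr g8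
  have b9 : ((9:Int) == s) = false := beq_eq_false_iff_ne.mpr g9
  simp [noteListUpdate, noteListUpdate_alt, pvScaleSteps, PySem.Dict.ofList,
    PySem.Dict.update, PySem.Dict.empty, PySem.Dict.insert,
    PySem.Dict.get?, List.find?, h0, h1, h2, h3, h4, h5, h6, h7, h8, h9,
    g0, g1, g2, g3, g4, g5, g6, g7, g8,
    b0, b1, b2, b3, b4, b5, b6, b7, b8, b9]
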